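-- pv_equiv track=rewrite | github.com/m25mathews/rainger_poc | cim-poc/src/python/curation_wizard/preprocess_loc_row.py | sublocation_lvl2_split
-- ===== SOURCE A (Python) =====
-- def sublocation_lvl2_split(tokens, sublocation_lvl2_list):
--     if any(token in tokens for token in sublocation_lvl2_list):
--         for i, token in enumerate(tokens):
--             if token in sublocation_lvl2_list:
--                 left = tokens[:i]
--                 right = tokens[i:]
--                 break
--     else:
--         left = tokens
--         right = []
--     return left, right
-- ===== SOURCE B (Python) =====
-- def sublocation_lvl2_split(tokens, sublocation_lvl2_list):
--     sub = set(sublocation_lvl2_list)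
--     left = []
--     it = iter(tokens)
--     for t in it:
--         if t in sub:
--             return left, [t, *it]
--         left.append(t)
--     return left, []
-- ===== Notes on version B (the rewrite author's own statement) =====
-- stated objective: alternative
-- what changed: B drops A's any() pre-scan and index/slice machinery entirely: it consumes the token iterator once, accumulating the prefix element by element, and when a sublocation token appears returns that prefix plus the matched token followed by the rest of the iterator (no enumerate, no tokens[:i]/tokens[i:]).
import Mathlib
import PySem

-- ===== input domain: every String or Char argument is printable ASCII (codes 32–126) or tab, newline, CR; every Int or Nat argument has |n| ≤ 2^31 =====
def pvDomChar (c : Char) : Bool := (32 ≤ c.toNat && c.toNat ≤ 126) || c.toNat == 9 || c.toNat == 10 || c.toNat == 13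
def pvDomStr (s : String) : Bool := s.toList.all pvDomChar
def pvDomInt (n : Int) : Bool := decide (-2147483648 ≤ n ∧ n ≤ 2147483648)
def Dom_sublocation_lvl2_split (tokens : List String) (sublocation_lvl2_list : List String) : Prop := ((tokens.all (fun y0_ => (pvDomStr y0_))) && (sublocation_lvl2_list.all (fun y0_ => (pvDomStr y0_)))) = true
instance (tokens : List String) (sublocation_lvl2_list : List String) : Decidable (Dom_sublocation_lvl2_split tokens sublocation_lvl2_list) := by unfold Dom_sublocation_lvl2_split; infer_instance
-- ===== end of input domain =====

-- B drops A's any() pre-scan and index/slice machinery: one pass that accumulates the prefix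
-- and returns the matched token followed by the rest of the traversal; objective: alternative.

-- ===== PORT A =====
-- the 'for i, token in enumerate(tokens): if token in sublocation_lvl2_list: … break' loop,
-- returning the break index (none = loop finished without break)
def pvAFind (subl : List String) : Nat → List String → Option Nat
  | _, [] => none
  | i, t :: rest => if subl.contains t then some i else pvAFind subl (i + 1) rest

def sublocation_lvl2_split (tokens : List String) (sublocation_lvl2_list : List String) : List String × List String :=
  if sublocation_lvl2_list.any (fun token => tokens.contains token) then
    match pvAFind sublocation_lvl2_list 0 tokens with
    | some i => (tokens.take i, tokens.drop i)  -- tokens[:i], tokens[i:] with 0 ≤ i ≤ len: exact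
    | none => (tokens, [])                      -- unreachable under the guard
  else (tokens, [])

-- ===== PORT B =====
-- Source B's loop over the iterator: accumulate 'left'; on a hit return (left, [t, *it])
def pvBGo (sub : PySem.Set String) (left : List String) : List String → List String × List String
  | [] => (left, [])
  | t :: it => if PySem.Set.contains sub t then (left, t :: it) else pvBGo sub (left ++ [t]) it

def sublocation_lvl2_split_alt (tokens : List String) (sublocation_lvl2_list : List String) : List String × List String :=
  pvBGo (PySem.Set.ofList sublocation_lvl2_list) [] tokens

-- ===== PRECONDITION & SPEC =====
def Spec_sublocation_lvl2_split (tokens : List String) (sublocation_lvl2_list : List String) (out : List String × List String) : Prop := out = sublocation_lvl2_split_alt tokens sublocation_lvl2_list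
instance (tokens : List String) (sublocation_lvl2_list : List String) (out : List String × List String) : Decidable (Spec_sublocation_lvl2_split tokens sublocation_lvl2_list out) := by unfold Spec_sublocation_lvl2_split; infer_instance

-- ===== CLAIM (what is proved, stated in full; the proofs are below) =====
def Claim_equal_sublocation_lvl2_split : Prop := ∀ (tokens : List String) (sublocation_lvl2_list : List String), Dom_sublocation_lvl2_split tokens sublocation_lvl2_list → Spec_sublocation_lvl2_split tokens sublocation_lvl2_list (sublocation_lvl2_split tokens sublocation_lvl2_list)

-- ===== LEMMAS AND PROOFS =====

-- set(subl) has the same membership as subl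
lemma contains_ofList (subl : List String) (t : String) :
    PySem.Set.contains (PySem.Set.ofList subl) t = subl.contains t := by
  simp [PySem.Set.contains, PySem.Set.mem_ofList]

-- A's locate loop shifted by an offset
lemma afind_shift (subl : List String) :
    ∀ (l : List String) (i : Nat), pvAFind subl i l = (pvAFind subl 0 l).map (· + i) := by
  intro l
  induction l with
  | nil => intro i; simp [pvAFind]
  | cons t rest ih =>
      intro i
      by_cases h : t ∈ subl
      · simp [pvAFind, h]
      · simp only [pvAFind, List.contains_eq_mem, h, decide_false, Bool.false_eq_true, if_false]
        rw [ih (i + 1), ih 1, Option.map_map]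
        congr 1
        funext j
        simp
        omega

-- A's match-form equals the takeWhile/dropWhile split at the first sublocation token
lemma afind_split (subl : List String) :
    ∀ (l : List String),
      (match pvAFind subl 0 l with
       | some j => (l.take j, l.drop j)
       | none => (l, ([] : List String)))
        = (l.takeWhile (fun t => !subl.contains t), l.dropWhile (fun t => !subl.contains t)) := by
  intro l
  induction l with
  | nil => simp [pvAFind]
  | cons t rest ih =>
      by_cases h : t ∈ subl
      · simp [pvAFind, h]
      · simp only [pvAFind, List.contains_eq_mem, h, decide_false, Bool.false_eq_true, if_false,
          List.takeWhile_cons, List.dropWhile_cons, Bool.not_false, if_true]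
        rw [afind_shift subl rest 1]
        cases hf : pvAFind subl 0 rest with
        | none =>
            simpa [hf] using ih
        | some j =>
            have := ih
            rw [hf] at this
            simp only [Prod.mk.injEq] at this
            simp [Option.map_some, List.take_succ_cons, List.drop_succ_cons,
              List.contains_eq_mem, this.1, this.2]

-- B's accumulator loop computes the same takeWhile/dropWhile split, prefixed by the accumulator
lemma bgo_split (subl : List String) :
    ∀ (l acc : List String),
      pvBGo (PySem.Set.ofList subl) acc l
        = (acc ++ l.takeWhile (fun t => !subl.contains t), l.dropWhile (fun t => !subl.contains t)) := by
  intro l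
  induction l with
  | nil => intro acc; simp [pvBGo]
  | cons t rest ih =>
      intro acc
      by_cases h : t ∈ subl
      · simp [pvBGo, h]
      · simp only [pvBGo, contains_ofList, List.contains_eq_mem, h, decide_false,
          Bool.false_eq_true, if_false,
          List.takeWhile_cons, List.dropWhile_cons, Bool.not_false, if_true]
        rw [ih (acc ++ [t])]
        simp

-- ===== VERDICT (by name: the statement is the Claim_ definition above) =====
theorem sublocation_lvl2_split_spec : Claim_equal_sublocation_lvl2_split := by
  intro tokens subl _
  unfold Spec_sublocation_lvl2_split sublocation_lvl2_split sublocation_lvl2_split_alt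
  rw [bgo_split subl tokens [], List.nil_append]
  by_cases hany : subl.any (fun token => tokens.contains token) = true
  · rw [if_pos hany, afind_split]
  · have hdisj : ∀ t ∈ tokens, t ∉ subl := by
      intro t ht hmem
      apply hany
      simp only [List.any_eq_true]
      exact ⟨t, hmem, by simp [List.contains_eq_mem, ht]⟩
    rw [if_neg hany]
    have htw : tokens.takeWhile (fun t => !subl.contains t) = tokens :=
      List.takeWhile_eq_self_iff.mpr (fun t ht => by
        simp [List.contains_eq_mem, hdisj t (by simpa using ht)])
    have hdw : tokens.dropWhile (fun t => !subl.contains t) = [] :=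
      List.dropWhile_eq_nil_iff.mpr (fun t ht => by
        simp [List.contains_eq_mem, hdisj t ht])
    rw [htw, hdw]
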